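-- pv_equiv track=rewrite | github.com/yanchen-7/Cloud-2006 | jsonl_to_csv.py | categorize_types
-- ===== SOURCE A (Python) =====
-- def categorize_types(types_list):
--     """
--     Categorizes a list of types into a single, broader category
--     based on a defined priority and an expanded keyword list.
--     """
--     if not isinstance(types_list, list):
--         return 'Others'
--
--     types_list_lower = [t.lower() for t in types_list]
--
--     # Priority 1: Food and Beverage
--     food_keywords = ['bakery', 'bar', 'cafe', 'food', 'liquor_store', 'meal_delivery', 'meal_takeaway', 'night_club', 'restaurant']
--     if any(keyword in types_list_lower for keyword in food_keywords):
--         return 'Food and Beverage'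
--
--     # Priority 2: Place of Worship
--     worship_keywords = ['cemetery', 'church', 'hindu_temple', 'mosque', 'place_of_worship']
--     if any(keyword in types_list_lower for keyword in worship_keywords):
--         return 'Place of Worship'
--
--     # Priority 3: Stays and Accommodations
--     stays_keywords = ['lodging', 'hotel', 'motel', 'hostel', 'resort', 'accommodation', 'campground', 'rv_park']
--     if any(keyword in types_list_lower for keyword in stays_keywords):
--         return 'Stays & Accommodations'
--
--     # Priority 4: Attractions, Activities
--     attractions_keywords = ['amusement_park', 'aquarium', 'art_gallery', 'library', 'movie_theater', 'museum',
--                             'natural_feature', 'park', 'tourist_attraction', 'zoo', 'landmark']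
--     if any(keyword in types_list_lower for keyword in attractions_keywords):
--         return 'Attractions & Activities'
--
--     # Priority 5: Shopping
--     shopping_keywords = ['bicycle_store', 'book_store', 'clothing_store', 'convenience_store', 'department_store',
--                          'electronics_store', 'florist', 'furniture_store', 'grocery_or_supermarket', 'home_goods_store',
--                          'jewelry_store', 'shoe_store', 'shopping_mall', 'store', 'supermarket']
--     if any(keyword in types_list_lower for keyword in shopping_keywords):
--         return 'Shopping'
--
--     # Priority 6: Sports & Wellness
--     sports_wellness_keywords = ['beauty_salon', 'spa', 'gym', 'health', 'bowling_alley', 'stadium']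
--     if any(keyword in types_list_lower for keyword in sports_wellness_keywords):
--         return 'Sports & Wellness'
--
--     # Default category
--     return 'Others'
-- ===== SOURCE B (Python) =====
-- _CATEGORIES = ['Food and Beverage', 'Place of Worship', 'Stays & Accommodations',
--                'Attractions & Activities', 'Shopping', 'Sports & Wellness']
--
-- _KEYWORDS = [
--     ['bakery', 'bar', 'cafe', 'food', 'liquor_store', 'meal_delivery', 'meal_takeaway', 'night_club', 'restaurant'],
--     ['cemetery', 'church', 'hindu_temple', 'mosque', 'place_of_worship'],
--     ['lodging', 'hotel', 'motel', 'hostel', 'resort', 'accommodation', 'campground', 'rv_park'],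
--     ['amusement_park', 'aquarium', 'art_gallery', 'library', 'movie_theater', 'museum',
--      'natural_feature', 'park', 'tourist_attraction', 'zoo', 'landmark'],
--     ['bicycle_store', 'book_store', 'clothing_store', 'convenience_store', 'department_store',
--      'electronics_store', 'florist', 'furniture_store', 'grocery_or_supermarket', 'home_goods_store',
--      'jewelry_store', 'shoe_store', 'shopping_mall', 'store', 'supermarket'],
--     ['beauty_salon', 'spa', 'gym', 'health', 'bowling_alley', 'stadium'],
-- ]
--
--
-- def _rank(t):
--     """Priority rank of a (lowercased) type string; len(_KEYWORDS) if unknown."""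
--     for i, kws in enumerate(_KEYWORDS):
--         if t in kws:
--             return i
--     return len(_KEYWORDS)
--
--
-- def categorize_types(types_list):
--     if not isinstance(types_list, list):
--         return 'Others'
--     best = len(_KEYWORDS)
--     for t in types_list:
--         r = _rank(t.lower())
--         if r < best:
--             best = r
--     return _CATEGORIES[best] if best < len(_KEYWORDS) else 'Others'
-- ===== Notes on version B (the rewrite author's own statement) =====
-- stated objective: alternative
-- what changed: Instead of six sequential any()-scans of the whole input (one per category, each testing every keyword for membership in the lowered list), B makes one pass over the input, computing a priority rank per element (first keyword table containing it) and keeping the minimum rank seen, then indexes the category-name table once.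
import Mathlib
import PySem

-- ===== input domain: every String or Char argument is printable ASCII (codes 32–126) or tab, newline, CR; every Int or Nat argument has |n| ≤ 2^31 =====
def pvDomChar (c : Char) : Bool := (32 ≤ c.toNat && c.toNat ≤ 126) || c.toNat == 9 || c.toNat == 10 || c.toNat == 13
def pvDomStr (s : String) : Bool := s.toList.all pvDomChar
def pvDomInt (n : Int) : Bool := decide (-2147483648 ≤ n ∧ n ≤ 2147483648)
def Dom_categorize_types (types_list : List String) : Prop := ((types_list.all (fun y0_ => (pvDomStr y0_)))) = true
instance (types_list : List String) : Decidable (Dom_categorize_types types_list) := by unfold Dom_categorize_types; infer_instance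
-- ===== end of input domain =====

-- B replaces A's six sequential any()-scans of the input with a single pass keeping the
-- minimum priority rank per element (alternative decomposition; same exact behaviour).


-- ===== PORT A =====
-- (the `isinstance(types_list, list)` guard is always true under the type convention)
def kwFood : List String := ["bakery", "bar", "cafe", "food", "liquor_store", "meal_delivery", "meal_takeaway", "night_club", "restaurant"]
def kwWorship : List String := ["cemetery", "church", "hindu_temple", "mosque", "place_of_worship"]
def kwStays : List String := ["lodging", "hotel", "motel", "hostel", "resort", "accommodation", "campground", "rv_park"]
def kwAttractions : List String := ["amusement_park", "aquarium", "art_gallery", "library", "movie_theater", "museum", "natural_feature", "park", "tourist_attraction", "zoo", "landmark"]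
def kwShopping : List String := ["bicycle_store", "book_store", "clothing_store", "convenience_store", "department_store", "electronics_store", "florist", "furniture_store", "grocery_or_supermarket", "home_goods_store", "jewelry_store", "shoe_store", "shopping_mall", "store", "supermarket"]
def kwSports : List String := ["beauty_salon", "spa", "gym", "health", "bowling_alley", "stadium"]

def categorize_types (types_list : List String) : String :=
  let lowered := types_list.map (fun t => PySem.Str.lower t)
  if kwFood.any (fun kw => lowered.contains kw) then "Food and Beverage"
  else if kwWorship.any (fun kw => lowered.contains kw) then "Place of Worship"
  else if kwStays.any (fun kw => lowered.contains kw) then "Stays & Accommodations"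
  else if kwAttractions.any (fun kw => lowered.contains kw) then "Attractions & Activities"
  else if kwShopping.any (fun kw => lowered.contains kw) then "Shopping"
  else if kwSports.any (fun kw => lowered.contains kw) then "Sports & Wellness"
  else "Others"

-- ===== PORT B =====
def pvCategories : List String := ["Food and Beverage", "Place of Worship", "Stays & Accommodations", "Attractions & Activities", "Shopping", "Sports & Wellness"]
def pvKeywords : List (List String) := [kwFood, kwWorship, kwStays, kwAttractions, kwShopping, kwSports]

-- `for i, kws in enumerate(_KEYWORDS): if t in kws: return i` / `return len(_KEYWORDS)`
def pvRankAux (t : String) : List (List String) → Nat → Nat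
  | [], i => i
  | kws :: rest, i => if kws.contains t then i else pvRankAux t rest (i + 1)

def pvRank (t : String) : Nat := pvRankAux t pvKeywords 0

def categorize_types_alt (types_list : List String) : String :=
  let best := types_list.foldl (fun b t =>
    let r := pvRank (PySem.Str.lower t)
    if r < b then r else b) pvKeywords.length
  if best < pvKeywords.length then pvCategories.getD best "" else "Others"

-- ===== PRECONDITION & SPEC =====
def Spec_categorize_types (types_list : List String) (out : String) : Prop := out = categorize_types_alt types_list
instance (types_list : List String) (out : String) : Decidable (Spec_categorize_types types_list out) := by unfold Spec_categorize_types; infer_instance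

-- ===== CLAIM (what is proved, stated in full; the proofs are below) =====
def Claim_equal_categorize_types : Prop := ∀ (types_list : List String), Dom_categorize_types types_list → Spec_categorize_types types_list (categorize_types types_list)

-- ===== LEMMAS AND PROOFS =====

-- the fold in B computes the minimum rank (characterised by ≤)
theorem pv_best_le_iff (l : List String) (b k : Nat) :
    l.foldl (fun b t =>
      let r := pvRank (PySem.Str.lower t)
      if r < b then r else b) b ≤ k ↔ b ≤ k ∨ ∃ t ∈ l, pvRank (PySem.Str.lower t) ≤ k := by
  induction l generalizing b with
  | nil => simp
  | cons x xs ih =>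
    simp only [List.foldl_cons, ih, List.mem_cons]
    constructor
    · rintro (h | ⟨t, ht, hr⟩)
      · by_cases hc : pvRank (PySem.Str.lower x) < b
        · simp [hc] at h
          exact Or.inr ⟨x, Or.inl rfl, h⟩
        · simp [hc] at h
          exact Or.inl h
      · exact Or.inr ⟨t, Or.inr ht, hr⟩
    · rintro (h | ⟨t, (rfl | ht), hr⟩)
      · left; split <;> omega
      · left; split <;> omega
      · exact Or.inr ⟨t, ht, hr⟩

-- rank characterisations: pvRank s ≤ i iff s is in one of the first i+1 keyword lists
theorem pv_rank_le0 (s : String) : pvRank s ≤ 0 ↔ s ∈ kwFood := by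
  simp only [pvRank, pvKeywords, pvRankAux]
  split_ifs with h <;> simp_all
theorem pv_rank_le1 (s : String) : pvRank s ≤ 1 ↔ s ∈ kwFood ∨ s ∈ kwWorship := by
  simp only [pvRank, pvKeywords, pvRankAux]
  split_ifs with h1 h2 <;> simp_all
theorem pv_rank_le2 (s : String) : pvRank s ≤ 2 ↔ s ∈ kwFood ∨ s ∈ kwWorship ∨ s ∈ kwStays := by
  simp only [pvRank, pvKeywords, pvRankAux]
  split_ifs with h1 h2 h3 <;> simp_all
theorem pv_rank_le3 (s : String) : pvRank s ≤ 3 ↔ s ∈ kwFood ∨ s ∈ kwWorship ∨ s ∈ kwStays ∨ s ∈ kwAttractions := by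
  simp only [pvRank, pvKeywords, pvRankAux]
  split_ifs with h1 h2 h3 h4 <;> simp_all
theorem pv_rank_le4 (s : String) : pvRank s ≤ 4 ↔ s ∈ kwFood ∨ s ∈ kwWorship ∨ s ∈ kwStays ∨ s ∈ kwAttractions ∨ s ∈ kwShopping := by
  simp only [pvRank, pvKeywords, pvRankAux]
  split_ifs with h1 h2 h3 h4 h5 <;> simp_all
theorem pv_rank_le5 (s : String) : pvRank s ≤ 5 ↔ s ∈ kwFood ∨ s ∈ kwWorship ∨ s ∈ kwStays ∨ s ∈ kwAttractions ∨ s ∈ kwShopping ∨ s ∈ kwSports := by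
  simp only [pvRank, pvKeywords, pvRankAux]
  split_ifs with h1 h2 h3 h4 h5 h6 <;> simp_all

-- A's condition for category i, rewritten as an existential over the input list
theorem pv_any_iff (kws : List String) (l : List String) :
    (kws.any (fun kw => (l.map (fun t => PySem.Str.lower t)).contains kw) = true) ↔
    ∃ t ∈ l, PySem.Str.lower t ∈ kws := by
  simp only [List.any_eq_true, List.contains_iff_mem, List.mem_map]
  constructor
  · rintro ⟨kw, hkw, t, ht, rfl⟩; exact ⟨t, ht, hkw⟩
  · rintro ⟨t, ht, h⟩; exact ⟨PySem.Str.lower t, h, t, ht, rfl⟩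

-- ===== VERDICT (by name: the statement is the Claim_ definition above) =====
theorem categorize_types_spec : Claim_equal_categorize_types := by
  intro l _
  unfold Spec_categorize_types categorize_types categorize_types_alt
  simp only []
  set best := l.foldl (fun b t =>
    let r := pvRank (PySem.Str.lower t)
    if r < b then r else b) pvKeywords.length with hbest
  have hle : ∀ k : Nat, best ≤ k ↔ pvKeywords.length ≤ k ∨ ∃ t ∈ l, pvRank (PySem.Str.lower t) ≤ k :=
    fun k => pv_best_le_iff l pvKeywords.length k
  have hlen : pvKeywords.length = 6 := by simp [pvKeywords]
  rw [hlen] at hle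
  by_cases c0 : ∃ t ∈ l, PySem.Str.lower t ∈ kwFood
  · have hb : best ≤ 0 := (hle 0).2 (Or.inr (by
      obtain ⟨t, ht, h⟩ := c0; exact ⟨t, ht, (pv_rank_le0 _).2 h⟩))
    have hb0 : best = 0 := Nat.le_zero.1 hb
    rw [if_pos ((pv_any_iff kwFood l).2 c0), hb0, hlen]
    rfl
  · rw [if_neg (fun h => c0 ((pv_any_iff kwFood l).1 h))]
    have n0 : ¬ best ≤ 0 := fun h => by
      rcases (hle 0).1 h with h | ⟨t, ht, hr⟩
      · omega
      · exact c0 ⟨t, ht, (pv_rank_le0 _).1 hr⟩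
    by_cases c1 : ∃ t ∈ l, PySem.Str.lower t ∈ kwWorship
    · have hb : best ≤ 1 := (hle 1).2 (Or.inr (by
        obtain ⟨t, ht, h⟩ := c1; exact ⟨t, ht, (pv_rank_le1 _).2 (Or.inr h)⟩))
      have hb1 : best = 1 := by omega
      rw [if_pos ((pv_any_iff kwWorship l).2 c1), hb1, hlen]
      rfl
    · rw [if_neg (fun h => c1 ((pv_any_iff kwWorship l).1 h))]
      have n1 : ¬ best ≤ 1 := fun h => by
        rcases (hle 1).1 h with h | ⟨t, ht, hr⟩
        · omega
        · rcases (pv_rank_le1 _).1 hr with h | h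
          · exact c0 ⟨t, ht, h⟩
          · exact c1 ⟨t, ht, h⟩
      by_cases c2 : ∃ t ∈ l, PySem.Str.lower t ∈ kwStays
      · have hb : best ≤ 2 := (hle 2).2 (Or.inr (by
          obtain ⟨t, ht, h⟩ := c2; exact ⟨t, ht, (pv_rank_le2 _).2 (Or.inr (Or.inr h))⟩))
        have hb2 : best = 2 := by omega
        rw [if_pos ((pv_any_iff kwStays l).2 c2), hb2, hlen]
        rfl
      · rw [if_neg (fun h => c2 ((pv_any_iff kwStays l).1 h))]
        have n2 : ¬ best ≤ 2 := fun h => by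
          rcases (hle 2).1 h with h | ⟨t, ht, hr⟩
          · omega
          · rcases (pv_rank_le2 _).1 hr with h | h | h
            · exact c0 ⟨t, ht, h⟩
            · exact c1 ⟨t, ht, h⟩
            · exact c2 ⟨t, ht, h⟩
        by_cases c3 : ∃ t ∈ l, PySem.Str.lower t ∈ kwAttractions
        · have hb : best ≤ 3 := (hle 3).2 (Or.inr (by
            obtain ⟨t, ht, h⟩ := c3; exact ⟨t, ht, (pv_rank_le3 _).2 (Or.inr (Or.inr (Or.inr h)))⟩))
          have hb3 : best = 3 := by omega
          rw [if_pos ((pv_any_iff kwAttractions l).2 c3), hb3, hlen]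
          rfl
        · rw [if_neg (fun h => c3 ((pv_any_iff kwAttractions l).1 h))]
          have n3 : ¬ best ≤ 3 := fun h => by
            rcases (hle 3).1 h with h | ⟨t, ht, hr⟩
            · omega
            · rcases (pv_rank_le3 _).1 hr with h | h | h | h
              · exact c0 ⟨t, ht, h⟩
              · exact c1 ⟨t, ht, h⟩
              · exact c2 ⟨t, ht, h⟩
              · exact c3 ⟨t, ht, h⟩
          by_cases c4 : ∃ t ∈ l, PySem.Str.lower t ∈ kwShopping
          · have hb : best ≤ 4 := (hle 4).2 (Or.inr (by
              obtain ⟨t, ht, h⟩ := c4; exact ⟨t, ht, (pv_rank_le4 _).2 (Or.inr (Or.inr (Or.inr (Or.inr h))))⟩))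
            have hb4 : best = 4 := by omega
            rw [if_pos ((pv_any_iff kwShopping l).2 c4), hb4, hlen]
            rfl
          · rw [if_neg (fun h => c4 ((pv_any_iff kwShopping l).1 h))]
            have n4 : ¬ best ≤ 4 := fun h => by
              rcases (hle 4).1 h with h | ⟨t, ht, hr⟩
              · omega
              · rcases (pv_rank_le4 _).1 hr with h | h | h | h | h
                · exact c0 ⟨t, ht, h⟩
                · exact c1 ⟨t, ht, h⟩
                · exact c2 ⟨t, ht, h⟩
                · exact c3 ⟨t, ht, h⟩
                · exact c4 ⟨t, ht, h⟩
            by_cases c5 : ∃ t ∈ l, PySem.Str.lower t ∈ kwSports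
            · have hb : best ≤ 5 := (hle 5).2 (Or.inr (by
                obtain ⟨t, ht, h⟩ := c5; exact ⟨t, ht, (pv_rank_le5 _).2 (Or.inr (Or.inr (Or.inr (Or.inr (Or.inr h)))))⟩))
              have hb5 : best = 5 := by omega
              rw [if_pos ((pv_any_iff kwSports l).2 c5), hb5, hlen]
              rfl
            · rw [if_neg (fun h => c5 ((pv_any_iff kwSports l).1 h))]
              have n5 : ¬ best ≤ 5 := fun h => by
                rcases (hle 5).1 h with h | ⟨t, ht, hr⟩
                · omega
                · rcases (pv_rank_le5 _).1 hr with h | h | h | h | h | h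
                  · exact c0 ⟨t, ht, h⟩
                  · exact c1 ⟨t, ht, h⟩
                  · exact c2 ⟨t, ht, h⟩
                  · exact c3 ⟨t, ht, h⟩
                  · exact c4 ⟨t, ht, h⟩
                  · exact c5 ⟨t, ht, h⟩
              rw [hlen, if_neg (by omega)]
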